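-- pv_equiv track=rewrite | github.com/molML/fragSMILES4reaction | src/utils/fix_data.py | group_sub_reactants
-- ===== SOURCE A (Python) =====
-- def group_sub_reactants(reactants):
--     sub_seq=[]
--     tmp = []
--     for element in reactants:
--         if element == '.' or element == '>':
--             if tmp:
--                 sub_seq.append(tmp)
--                 tmp = []
--         else:
--             tmp.append(element)
--
--     if tmp:
--         sub_seq.append(tmp)
--
--     return sub_seq
-- ===== SOURCE B (Python) =====
-- def group_sub_reactants(reactants):
--     # stage 1: find the separator positions; stage 2: slice between consecutive
--     # boundaries, keeping only non-empty slices
--     bounds = [-1] + [i for i, e in enumerate(reactants) if e == '.' or e == '>'] \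
--                   + [len(reactants)]
--     return [reactants[a + 1:b] for a, b in zip(bounds, bounds[1:]) if b - a > 1]
-- ===== Notes on version B (the rewrite author's own statement) =====
-- stated objective: alternative
-- what changed: Replaces A's single-pass accumulator with explicit flushing by two staged passes: first collect the separator positions, then slice the list between consecutive boundaries, keeping the non-empty slices.
import Mathlib
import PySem

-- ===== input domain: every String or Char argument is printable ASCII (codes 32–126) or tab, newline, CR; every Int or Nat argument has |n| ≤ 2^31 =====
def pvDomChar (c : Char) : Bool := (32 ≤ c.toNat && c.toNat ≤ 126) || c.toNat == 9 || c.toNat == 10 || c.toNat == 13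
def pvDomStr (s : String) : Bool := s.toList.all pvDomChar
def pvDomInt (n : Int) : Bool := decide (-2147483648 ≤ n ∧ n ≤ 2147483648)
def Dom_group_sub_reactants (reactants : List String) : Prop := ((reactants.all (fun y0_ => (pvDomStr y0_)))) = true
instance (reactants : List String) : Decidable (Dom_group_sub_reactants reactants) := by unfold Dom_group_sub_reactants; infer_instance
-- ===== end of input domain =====

-- B replaces A's single-pass accumulator with two staged passes: first collect the
-- separator positions, then slice between consecutive boundaries, keeping the
-- non-empty slices (alternative decomposition; same cost).

-- ===== PORT A =====
-- the loop body: state is (sub_seq, tmp)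
def pvStepA (st : List (List String) × List String) (element : String) :
    List (List String) × List String :=
  if element = "." ∨ element = ">" then
    (if st.2 ≠ [] then (st.1 ++ [st.2], []) else st)
  else (st.1, st.2 ++ [element])

def group_sub_reactants (reactants : List String) : List (List String) :=
  let st := reactants.foldl pvStepA ([], [])
  if st.2 ≠ [] then st.1 ++ [st.2] else st.1

-- ===== PORT B =====
-- e == '.' or e == '>'
def pvIsSep (e : String) : Bool := e == "." || e == ">"

-- [i for i, e in enumerate(reactants) if e == '.' or e == '>'] : indexed traversal
def pvSepIdx : Nat → List String → List Int
  | _, [] => []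
  | i, e :: r => if pvIsSep e then (i : Int) :: pvSepIdx (i + 1) r else pvSepIdx (i + 1) r

def group_sub_reactants_alt (reactants : List String) : List (List String) :=
  let bounds : List Int := -1 :: pvSepIdx 0 reactants ++ [(reactants.length : Int)]
  (bounds.zip bounds.tail).filterMap (fun p =>
    if p.2 - p.1 > 1 then some (PySem.List.slice reactants (some (p.1 + 1)) (some p.2))
    else none)

-- ===== PRECONDITION & SPEC =====
def Spec_group_sub_reactants (reactants : List String) (out : List (List String)) : Prop := out = group_sub_reactants_alt reactants
instance (reactants : List String) (out : List (List String)) : Decidable (Spec_group_sub_reactants reactants out) := by unfold Spec_group_sub_reactants; infer_instance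

-- ===== CLAIM (what is proved, stated in full; the proofs are below) =====
def Claim_equal_group_sub_reactants : Prop := ∀ (reactants : List String), Dom_group_sub_reactants reactants → Spec_group_sub_reactants reactants (group_sub_reactants reactants)

-- ===== LEMMAS AND PROOFS =====

-- reference function: the maximal separator-free runs (both ports are proved equal to it)
def pvRunsB : List String → List (List String)
  | [] => []
  | e :: rest =>
    if pvIsSep e then
      pvRunsB (rest.dropWhile pvIsSep)
    else
      (e :: rest.takeWhile (fun x => !pvIsSep x)) ::
        pvRunsB (rest.dropWhile (fun x => !pvIsSep x))
termination_by l => l.length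
decreasing_by
  · exact Nat.lt_succ_of_le (rest.length_dropWhile_le _)
  · exact Nat.lt_succ_of_le (rest.length_dropWhile_le _)

-- ---------- A = pvRunsB ----------

-- A's loop result from an arbitrary accumulator is the accumulator prefix plus the rest
theorem pvFoldA_acc (l : List String) (sub : List (List String)) (tmp : List String) :
    l.foldl pvStepA (sub, tmp) =
      (sub ++ (l.foldl pvStepA ([], tmp)).1, (l.foldl pvStepA ([], tmp)).2) := by
  induction l generalizing sub tmp with
  | nil => simp
  | cons e rest ih =>
    simp only [List.foldl_cons, pvStepA]
    by_cases hs : e = "." ∨ e = ">"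
    · simp only [hs, if_pos]
      by_cases ht : tmp = []
      · subst ht; simpa using ih sub []
      · simp only [ne_eq, ht, not_false_iff, ite_true, List.nil_append]
        rw [ih (sub ++ [tmp]) [], ih [tmp] []]
        simp
    · simp only [hs, if_neg, not_false_iff]
      rw [ih sub (tmp ++ [e]), ih [] (tmp ++ [e])]

-- skipping one separator at the head does not change the runs
theorem pvRunsB_sep_cons (e : String) (rest : List String) (h : pvIsSep e = true) :
    pvRunsB (e :: rest) = pvRunsB rest := by
  rw [pvRunsB]
  simp only [h, if_pos]
  cases rest with
  | nil => simp
  | cons x r =>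
    by_cases hx : pvIsSep x = true
    · rw [List.dropWhile_cons_of_pos hx]
      conv_rhs => rw [pvRunsB]
      simp [hx]
    · rw [List.dropWhile_cons_of_neg (by simp [hx])]

-- A's finishing step applied after the loop from tmp
def pvFinA (l : List String) (tmp : List String) : List (List String) :=
  let st := l.foldl pvStepA ([], tmp)
  if st.2 ≠ [] then st.1 ++ [st.2] else st.1

theorem pvFinA_eq (l : List String) : ∀ tmp : List String,
    pvFinA l tmp =
      if tmp = [] then pvRunsB l
      else (tmp ++ l.takeWhile (fun x => !pvIsSep x)) ::
             pvRunsB (l.dropWhile (fun x => !pvIsSep x)) := by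
  induction l with
  | nil =>
    intro tmp
    by_cases ht : tmp = [] <;> simp [pvFinA, pvRunsB, ht]
  | cons e rest ih =>
    intro tmp
    by_cases hs : pvIsSep e = true
    · have hs' : e = "." ∨ e = ">" := by simpa [pvIsSep] using hs
      have hfold : pvFinA (e :: rest) tmp =
          (if tmp = [] then [] else [tmp]) ++ pvFinA rest [] := by
        by_cases ht : tmp = []
        · subst ht; simp [pvFinA, pvStepA, hs']
        · simp only [pvFinA, List.foldl_cons, pvStepA, hs', if_pos, ne_eq, ht,
            not_false_iff, List.nil_append]
          rw [pvFoldA_acc rest [tmp] []]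
          by_cases h2 : (rest.foldl pvStepA ([], [])).2 = [] <;> simp [h2]
      rw [hfold, ih []]
      simp only []
      by_cases ht : tmp = []
      · simp [ht, pvRunsB_sep_cons e rest hs]
      · simp only [ht, ite_false, List.nil_append]
        rw [List.takeWhile_cons_of_neg (by simp [hs]),
            List.dropWhile_cons_of_neg (by simp [hs])]
        rw [pvRunsB_sep_cons e rest hs]
        simp
    · have hs' : ¬ (e = "." ∨ e = ">") := by
        simp [pvIsSep] at hs; simp [hs]
      have hfold : pvFinA (e :: rest) tmp = pvFinA rest (tmp ++ [e]) := by
        simp [pvFinA, pvStepA, hs']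
      rw [hfold, ih (tmp ++ [e])]
      rw [if_neg (by simp : ¬ tmp ++ [e] = [])]
      by_cases ht : tmp = []
      · subst ht
        rw [if_pos rfl, pvRunsB]
        simp [hs]
      · rw [if_neg ht]
        rw [List.takeWhile_cons_of_pos (by simp [hs]),
            List.dropWhile_cons_of_pos (by simp [hs])]
        simp

-- ---------- B = pvRunsB ----------

-- the slicing stage of B, over an arbitrary boundary list
def pvSlices (l : List String) (bounds : List Int) : List (List String) :=
  (bounds.zip bounds.tail).filterMap (fun p =>
    if p.2 - p.1 > 1 then some (PySem.List.slice l (some (p.1 + 1)) (some p.2))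
    else none)

theorem pvAlt_eq_slices (l : List String) :
    group_sub_reactants_alt l =
      pvSlices l (-1 :: pvSepIdx 0 l ++ [(l.length : Int)]) := rfl

-- runs of a separator-free list
theorem pvRunsB_sepfree (t : List String) (ht : ∀ x ∈ t, pvIsSep x = false) :
    pvRunsB t = if t = [] then [] else [t] := by
  cases t with
  | nil => simp [pvRunsB]
  | cons e r =>
    have he : pvIsSep e = false := ht e (by simp)
    rw [pvRunsB]
    simp only [he, Bool.false_eq_true, if_false]
    have h1 : r.takeWhile (fun x => !pvIsSep x) = r :=
      List.takeWhile_eq_self_iff.mpr (by intro x hx; simp [ht x (List.mem_cons_of_mem _ hx)])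
    have h2 : r.dropWhile (fun x => !pvIsSep x) = [] :=
      List.dropWhile_eq_nil_iff.mpr (by intro x hx; simp [ht x (List.mem_cons_of_mem _ hx)])
    simp [h1, h2, pvRunsB]

-- takeWhile/dropWhile across a separator-free prefix followed by a separator
theorem pvTakeW (t : List String) (ht : ∀ x ∈ t, pvIsSep x = false)
    (e : String) (he : pvIsSep e = true) (r : List String) :
    (t ++ e :: r).takeWhile (fun x => !pvIsSep x) = t := by
  induction t with
  | nil => simp [he]
  | cons y ys ihy =>
    have hy : pvIsSep y = false := ht y (by simp)
    simp only [List.cons_append, List.takeWhile_cons, hy]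
    simp [ihy (fun z hz => ht z (List.mem_cons_of_mem _ hz))]

theorem pvDropW (t : List String) (ht : ∀ x ∈ t, pvIsSep x = false)
    (e : String) (he : pvIsSep e = true) (r : List String) :
    (t ++ e :: r).dropWhile (fun x => !pvIsSep x) = e :: r := by
  induction t with
  | nil => simp [he]
  | cons y ys ihy =>
    have hy : pvIsSep y = false := ht y (by simp)
    simp only [List.cons_append, List.dropWhile_cons, hy]
    simp [ihy (fun z hz => ht z (List.mem_cons_of_mem _ hz))]

-- a separator-free prefix followed by a separator head is one run
theorem pvRunsB_run (t : List String) (ht : ∀ x ∈ t, pvIsSep x = false)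
    (e : String) (he : pvIsSep e = true) (r : List String) :
    pvRunsB (t ++ e :: r) = (if t = [] then [] else [t]) ++ pvRunsB r := by
  cases t with
  | nil => simpa using pvRunsB_sep_cons e r he
  | cons x t' =>
    have hx : pvIsSep x = false := ht x (by simp)
    have ht' : ∀ y ∈ t', pvIsSep y = false := fun y hy => ht y (List.mem_cons_of_mem _ hy)
    rw [List.cons_append, pvRunsB]
    simp only [hx, Bool.false_eq_true, if_false]
    rw [pvTakeW t' ht' e he r, pvDropW t' ht' e he r, pvRunsB_sep_cons e r he]
    simp

-- the slice B takes between a run's two boundaries is the pending prefix part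
theorem pvSlice_prefix (pre l : List String) (s : Nat) (hs : s ≤ pre.length) :
    PySem.List.slice (pre ++ l) (some (((s : Int) - 1) + 1)) (some (pre.length : Int)) =
      pre.drop s := by
  have h1 : ((s : Int) - 1) + 1 = (s : Int) := by ring
  rw [h1, PySem.List.slice_natCast]
  rw [List.drop_append_of_le_length hs]
  have hlen : (pre.drop s).length = pre.length - s := List.length_drop ..
  rw [List.take_append_of_le_length (by omega), List.take_of_length_le (by omega)]

-- MAIN: B's slicing stage, run from a pending separator-free suffix of `pre`
-- starting at index s, computes the runs of that suffix followed by l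
theorem pvSlices_eq (l : List String) : ∀ (pre : List String) (s : Nat),
    s ≤ pre.length → (∀ x ∈ pre.drop s, pvIsSep x = false) →
    pvSlices (pre ++ l)
        (((s : Int) - 1) :: pvSepIdx pre.length l ++ [((pre.length + l.length : Nat) : Int)]) =
      pvRunsB (pre.drop s ++ l) := by
  induction l with
  | nil =>
    intro pre s hs hfree
    rw [List.append_nil, List.append_nil, pvRunsB_sepfree _ hfree]
    by_cases hlt : s < pre.length
    · have hc : ((pre.length : Nat) : Int) - ((s : Int) - 1) > 1 := by omega
      have hne : ¬ pre.drop s = [] := by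
        intro h; have := List.length_drop (l := pre) (i := s); rw [h] at this; simp at this; omega
      simp [pvSlices, pvSepIdx, hc, hne]
      rw [PySem.List.slice_natCast]
      exact List.take_of_length_le (by simp)
    · have hse : s = pre.length := by omega
      subst hse
      simp [pvSlices, pvSepIdx]
  | cons e r ih =>
    intro pre s hs hfree
    by_cases hsep : pvIsSep e = true
    · -- separator at index pre.length: close the pending run, restart after it
      rw [pvSepIdx]
      simp only [hsep, if_pos]
      have hzip : ((((s : Int) - 1) :: (((pre.length : Nat) : Int) :: pvSepIdx (pre.length + 1) r) ++
            [((pre.length + (e :: r).length : Nat) : Int)]).zip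
            ((((s : Int) - 1) :: (((pre.length : Nat) : Int) :: pvSepIdx (pre.length + 1) r) ++
            [((pre.length + (e :: r).length : Nat) : Int)]).tail)) =
          (((s : Int) - 1), ((pre.length : Nat) : Int)) ::
            (((((pre.length : Nat) : Int) :: pvSepIdx (pre.length + 1) r) ++
              [((pre.length + (e :: r).length : Nat) : Int)]).zip
             ((((pre.length : Nat) : Int) :: pvSepIdx (pre.length + 1) r ++
              [((pre.length + (e :: r).length : Nat) : Int)]).tail)) := by
        simp [List.zip]
      rw [pvSlices, hzip, List.filterMap_cons]
      have hIH := ih (pre ++ [e]) (pre.length + 1)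
        (by simp) (by simp)
      have harr : pre ++ [e] ++ r = pre ++ e :: r := by simp
      have hlen1 : (pre ++ [e]).length = pre.length + 1 := by simp
      have hcast : ((pre.length + 1 : Nat) : Int) - 1 = ((pre.length : Nat) : Int) := by
        push_cast; ring
      rw [hlen1, harr, hcast] at hIH
      have hlen2 : pre.length + 1 + r.length = pre.length + (e :: r).length := by simp; omega
      rw [hlen2] at hIH
      rw [pvSlices] at hIH
      rw [hIH]
      rw [pvRunsB_run (pre.drop s) hfree e hsep r]
      by_cases hlt : s < pre.length
      · rw [if_pos (by push_cast; omega)]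
        rw [pvSlice_prefix pre (e :: r) s hs]
        have hne : ¬ pre.drop s = [] := by
          intro h; have := List.length_drop (l := pre) (i := s); rw [h] at this; simp at this; omega
        simp [hne]
      · have hse : s = pre.length := by omega
        subst hse
        rw [if_neg (by push_cast; omega)]
        simp
    · -- non-separator: extend the pending run
      rw [pvSepIdx]
      simp only [hsep, if_neg, Bool.not_eq_true]
      have hIH := ih (pre ++ [e]) s
        (by simp; omega)
        (by
          rw [List.drop_append_of_le_length hs]
          intro x hx
          rcases List.mem_append.mp hx with h | h
          · exact hfree x h
          · simp at h; subst h; simpa using hsep)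
      have harr : pre ++ [e] ++ r = pre ++ e :: r := by simp
      have hlen1 : (pre ++ [e]).length = pre.length + 1 := by simp
      rw [hlen1, harr] at hIH
      have hlen2 : pre.length + 1 + r.length = pre.length + (e :: r).length := by simp; omega
      rw [hlen2] at hIH
      rw [hIH, List.drop_append_of_le_length hs]
      simp

-- ===== VERDICT (by name: the statement is the Claim_ definition above) =====
theorem group_sub_reactants_spec : Claim_equal_group_sub_reactants := by
  intro reactants _
  show group_sub_reactants reactants = group_sub_reactants_alt reactants
  have hA : group_sub_reactants reactants = pvRunsB reactants := by
    have h := pvFinA_eq reactants []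
    simpa [pvFinA, group_sub_reactants] using h
  have hB : group_sub_reactants_alt reactants = pvRunsB reactants := by
    rw [pvAlt_eq_slices]
    have h := pvSlices_eq reactants [] 0 (by simp) (by simp)
    simpa using h
  rw [hA, hB]
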